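-- pv_equiv track=rewrite | github.com/PrinceSinghhub/GFG-Questions | Wine Buying and Selling.py | wineSelling
-- ===== SOURCE A (Python) =====
-- def wineSelling(A, N):
--
--     # code here
--
--     buy = []
--
--     sell = []
--
--     for i in range(N):
--
--         if (A[i] > 0):
--
--             buy.append([A[i], i])
--
--         else:
--
--             sell.append([A[i], i])
--
--     ans, i, j, dis = 0, 0, 0, 0
--
--     while (i < len(buy) and j < len(sell)):
--
--         mn = min(buy[i][0], abs(sell[j][0]))
--
--         buy[i][0] -= mn
--
--         sell[j][0] += mn
--
--         dis = abs(buy[i][1] - sell[j][1])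
--
--         ans += (dis * mn)
--
--         if (buy[i][0] == 0):
--             i += 1
--
--         if (sell[j][0] == 0):
--             j += 1
--
--     return ans
-- ===== SOURCE B (Python) =====
-- def wineSelling(A, N):
--     pre = A[:max(N, 0)]
--     tb = sum(x for x in pre if x > 0)
--     ts = sum(-x for x in pre if x <= 0)
--     m = min(tb, ts)
--     ans = 0
--     cb = 0
--     cs = 0
--     for x in pre:
--         if x > 0:
--             cb += x
--         else:
--             cs -= x
--         ans += abs(min(cb, m) - min(cs, m))
--     return ans
-- ===== Notes on version B (the rewrite author's own statement) =====
-- stated objective: simpler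
-- what changed: Replaced the two-pointer greedy matching over separately built buy/sell lists by a single left-to-right prefix-sum pass: the answer is the sum over gaps of |min(cumBuy,M)-min(cumSell,M)| with M = min(total buys, total sells), so no matching state is kept at all.
import Mathlib
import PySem

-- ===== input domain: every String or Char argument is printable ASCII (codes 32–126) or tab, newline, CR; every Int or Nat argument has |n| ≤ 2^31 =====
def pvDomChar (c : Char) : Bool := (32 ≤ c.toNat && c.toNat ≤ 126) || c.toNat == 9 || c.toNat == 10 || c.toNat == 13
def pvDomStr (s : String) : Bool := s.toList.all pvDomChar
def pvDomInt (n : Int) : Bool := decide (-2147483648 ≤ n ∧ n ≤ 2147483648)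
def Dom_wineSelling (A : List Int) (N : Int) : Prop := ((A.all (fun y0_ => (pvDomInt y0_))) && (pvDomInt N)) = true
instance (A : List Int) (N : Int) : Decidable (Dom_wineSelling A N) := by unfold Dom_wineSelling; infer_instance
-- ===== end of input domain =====

-- B replaces A's two-pointer greedy matching by a single prefix-sum pass (sum over gaps of the
-- capped flow |min(cumBuy,M)-min(cumSell,M)|, M = min of the two totals); same O(n) cost, simpler.
-- A does not mutate its argument (it copies values into fresh buy/sell lists).


-- ===== PORT A =====
-- the while loop of A; buy/sell entries are (amount, position); indexes are always in range under
-- the loop guard, so getD's default is never used.  The inner `if hp : …` guard only makes the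
-- recursion well-founded: A's loop always advances i or j because sell amounts are ≤ 0.
def wineSellingLoop (buy sell : List (Int × Int)) (i j : Nat) (ans : Int) : Int :=
  if h : i < buy.length ∧ j < sell.length then
    let b := buy.getD i (0, 0)
    let s := sell.getD j (0, 0)
    let mn := min b.1 |s.1|
    let buy' := buy.set i (b.1 - mn, b.2)
    let sell' := sell.set j (s.1 + mn, s.2)
    let dis := |b.2 - s.2|
    let ans' := ans + dis * mn
    let i' := if b.1 - mn = 0 then i + 1 else i
    let j' := if s.1 + mn = 0 then j + 1 else j
    if hp : i + j < i' + j' then wineSellingLoop buy' sell' i' j' ans'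
    else ans'
  else ans
termination_by (buy.length - i) + (sell.length - j)
decreasing_by
  have hp' : i + j < (if (buy.getD i (0, 0)).1 - min (buy.getD i (0, 0)).1 |(sell.getD j (0, 0)).1| = 0 then i + 1 else i)
      + (if (sell.getD j (0, 0)).1 + min (buy.getD i (0, 0)).1 |(sell.getD j (0, 0)).1| = 0 then j + 1 else j) := hp
  clear hp
  simp only [List.length_set]
  split_ifs at hp' ⊢ <;> omega

def wineSelling (A : List Int) (N : Int) : Int :=
  -- for i in range(N): append [A[i], i] to buy (A[i] > 0) or to sell
  let bs := (PySem.List.pyRange 0 N 1).foldl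
    (fun (acc : List (Int × Int) × List (Int × Int)) i =>
      let x := PySem.List.pyGetD A i 0   -- A[i]; always in range under Pre_
      if x > 0 then (acc.1 ++ [(x, i)], acc.2) else (acc.1, acc.2 ++ [(x, i)]))
    ([], [])
  wineSellingLoop bs.1 bs.2 0 0 0

-- ===== PORT B =====
def wineSelling_alt (A : List Int) (N : Int) : Int :=
  let pre := PySem.List.slice A none (some (max N 0))
  let tb := (pre.filter (fun x => x > 0)).sum
  let ts := ((pre.filter (fun x => x ≤ 0)).map (fun x => -x)).sum
  let m := min tb ts
  let r := pre.foldl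
    (fun (st : Int × Int × Int) x =>
      let cb := if x > 0 then st.2.1 + x else st.2.1
      let cs := if x > 0 then st.2.2 else st.2.2 - x
      (st.1 + |min cb m - min cs m|, cb, cs))
    (0, 0, 0)
  r.1

-- ===== PRECONDITION & SPEC =====
-- Pre_ excludes only N > len(A), on which A raises IndexError (A[i] inside the range(N) loop).
def Pre_wineSelling (A : List Int) (N : Int) : Prop := N ≤ A.length
instance (A : List Int) (N : Int) : Decidable (Pre_wineSelling A N) := by unfold Pre_wineSelling; infer_instance

def pvWitness_wineSelling : List Int × Int := ([2, 0, -1, -1], 4)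

def Spec_wineSelling (A : List Int) (N : Int) (out : Int) : Prop := out = wineSelling_alt A N
instance (A : List Int) (N : Int) (out : Int) : Decidable (Spec_wineSelling A N out) := by unfold Spec_wineSelling; infer_instance

-- ===== CLAIM (what is proved, stated in full; the proofs are below) =====
def Claim_equal_wineSelling : Prop := ∀ (A : List Int) (N : Int), Dom_wineSelling A N → Pre_wineSelling A N → Spec_wineSelling A N (wineSelling A N)

-- ===== LEMMAS AND PROOFS =====

-- cbF B t: buy volume at positions ≤ t;  csF S t: sell volume (magnitudes) at positions ≤ t
def cbF (L : List (Int × Int)) (t : Int) : Int := (L.map (fun e => if e.2 ≤ t then e.1 else 0)).sum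
def csF (L : List (Int × Int)) (t : Int) : Int := (L.map (fun e => if e.2 ≤ t then -e.1 else 0)).sum
def totB (L : List (Int × Int)) : Int := (L.map (fun e => e.1)).sum
def totS (L : List (Int × Int)) : Int := (L.map (fun e => -e.1)).sum

-- the prefix-flow potential: total capped flow over the n gaps
def PP (n : Nat) (B S : List (Int × Int)) : Int :=
  ∑ t ∈ Finset.range n,
    |min (cbF B t) (min (totB B) (totS S)) - min (csF S t) (min (totB B) (totS S))|

-- head-consuming form of A's greedy loop (sell amounts kept negative; mn = min b (-s))
def loop2 : List (Int × Int) → List (Int × Int) → Int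
  | [], _ => 0
  | _ :: _, [] => 0
  | e :: B, f :: S =>
    |e.2 - f.2| * min e.1 (-f.1)
      + loop2 (if e.1 - min e.1 (-f.1) = 0 then B else (e.1 - min e.1 (-f.1), e.2) :: B)
              (if f.1 + min e.1 (-f.1) = 0 then S else (f.1 + min e.1 (-f.1), f.2) :: S)
termination_by B S => B.length + S.length
decreasing_by
  have h := min_choice e.1 (-f.1)
  split <;> split <;> simp <;> omega

-- splitL L k: A's buy/sell split of L, positions starting at k
def splitL : List Int → Int → List (Int × Int) × List (Int × Int)
  | [], _ => ([], [])
  | x :: xs, k =>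
    let r := splitL xs (k + 1)
    if x > 0 then ((x, k) :: r.1, r.2) else (r.1, (x, k) :: r.2)

-- ---- small facts about cbF / csF / totB / totS ----

theorem cbF_eq_zero {L : List (Int × Int)} {t : Int} (h : ∀ e ∈ L, t < e.2) : cbF L t = 0 := by
  induction L with
  | nil => simp [cbF]
  | cons e L ih =>
    have he := h e (by simp)
    have hL := ih fun e' he' => h e' (by simp [he'])
    simp only [cbF, List.map_cons, List.sum_cons] at hL ⊢
    rw [if_neg (by omega), hL, add_zero]

theorem csF_eq_zero {L : List (Int × Int)} {t : Int} (h : ∀ e ∈ L, t < e.2) : csF L t = 0 := by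
  induction L with
  | nil => simp [csF]
  | cons e L ih =>
    have he := h e (by simp)
    have hL := ih fun e' he' => h e' (by simp [he'])
    simp only [csF, List.map_cons, List.sum_cons] at hL ⊢
    rw [if_neg (by omega), hL, add_zero]

theorem cbF_cons (e : Int × Int) (L : List (Int × Int)) (t : Int) :
    cbF (e :: L) t = (if e.2 ≤ t then e.1 else 0) + cbF L t := by
  simp [cbF]

theorem csF_cons (e : Int × Int) (L : List (Int × Int)) (t : Int) :
    csF (e :: L) t = (if e.2 ≤ t then -e.1 else 0) + csF L t := by
  simp [csF]

theorem cbF_nonneg {L : List (Int × Int)} {t : Int} (h : ∀ e ∈ L, 0 ≤ e.1) : 0 ≤ cbF L t := by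
  induction L with
  | nil => simp [cbF]
  | cons e L ih =>
    have h1 : 0 ≤ (if e.2 ≤ t then e.1 else 0) := by
      split_ifs
      · exact h e (by simp)
      · exact le_refl 0
    have h2 : 0 ≤ cbF L t := ih fun e' he' => h e' (by simp [he'])
    simp only [cbF, List.map_cons, List.sum_cons] at h2 ⊢
    omega

theorem csF_nonneg {L : List (Int × Int)} {t : Int} (h : ∀ e ∈ L, e.1 ≤ 0) : 0 ≤ csF L t := by
  induction L with
  | nil => simp [csF]
  | cons e L ih =>
    have h1 : 0 ≤ (if e.2 ≤ t then -e.1 else 0) := by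
      split_ifs with hh
      · have := h e (by simp); omega
      · omega
    have h2 : 0 ≤ csF L t := ih fun e' he' => h e' (by simp [he'])
    simp only [csF, List.map_cons, List.sum_cons] at h2 ⊢
    omega

theorem totB_nonneg {L : List (Int × Int)} (h : ∀ e ∈ L, 0 ≤ e.1) : 0 ≤ totB L := by
  induction L with
  | nil => simp [totB]
  | cons e L ih =>
    simp only [totB, List.map_cons, List.sum_cons]
    have h2 : 0 ≤ totB L := ih fun e' he' => h e' (by simp [he'])
    have h1 := h e (by simp)
    simp only [totB] at h2; omega

theorem totS_nonneg {L : List (Int × Int)} (h : ∀ e ∈ L, e.1 ≤ 0) : 0 ≤ totS L := by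
  induction L with
  | nil => simp [totS]
  | cons e L ih =>
    simp only [totS, List.map_cons, List.sum_cons]
    have h2 : 0 ≤ totS L := ih fun e' he' => h e' (by simp [he'])
    have h1 := h e (by simp)
    simp only [totS] at h2; omega

-- ---- the indicator-sum counting lemma ----

theorem sum_ite_lt (c : Int) : ∀ (n : Nat) (b : Int), 0 ≤ b → b ≤ (n : Int) →
    (∑ t ∈ Finset.range n, if (t : Int) < b then c else 0) = c * b := by
  intro n
  induction n with
  | zero => intro b h0 hn; simp at hn ⊢; omega
  | succ n ih =>
    intro b h0 hn
    rw [Finset.sum_range_succ]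
    by_cases hb : b ≤ (n : Int)
    · rw [ih b h0 hb, if_neg (by omega)]; ring
    · have hbe : b = (n : Int) + 1 := by push_cast at hn ⊢; omega
      subst hbe
      have hc : ∀ t ∈ Finset.range n, (if (t : Int) < (n : Int) + 1 then c else 0) = c := by
        intro t ht
        have := Finset.mem_range.mp ht
        rw [if_pos (by push_cast; omega)]
      rw [Finset.sum_congr rfl hc, Finset.sum_const, if_pos (by omega), Finset.card_range,
          nsmul_eq_mul]
      ring

theorem sum_ite_Ico (c : Int) (n : Nat) (a b : Int) (h0 : 0 ≤ a) (hab : a ≤ b) (hbn : b ≤ (n : Int)) :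
    (∑ t ∈ Finset.range n, if a ≤ (t : Int) ∧ (t : Int) < b then c else 0) = c * (b - a) := by
  have hpt : ∀ t ∈ Finset.range n,
      (if a ≤ (t : Int) ∧ (t : Int) < b then c else 0)
        = (if (t : Int) < b then c else 0) - (if (t : Int) < a then c else 0) := by
    intro t _
    split_ifs <;> omega
  rw [Finset.sum_congr rfl hpt, Finset.sum_sub_distrib,
      sum_ite_lt c n b (by omega) hbn, sum_ite_lt c n a h0 (by omega)]
  ring

-- ---- the per-gap step identity (pure arithmetic) ----

theorem term_step (cb cs M mn : Int) (bp bq : Prop) [Decidable bp] [Decidable bq]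
    (hmn : 0 ≤ mn) (hM : mn ≤ M)
    (hcb : if bp then mn ≤ cb else cb = 0) (hcs : if bq then mn ≤ cs else cs = 0) :
    |min cb M - min cs M|
      = |min (cb - (if bp then mn else 0)) (M - mn) - min (cs - (if bq then mn else 0)) (M - mn)|
        + (if (bp ∧ ¬bq) ∨ (bq ∧ ¬bp) then mn else 0) := by
  by_cases hbp : bp <;> by_cases hbq : bq <;>
    simp only [hbp, hbq, if_true, if_false, true_and, false_and, and_true, and_false,
      not_true, not_false_iff, true_or, or_true, false_or, or_false] at hcb hcs ⊢ <;>
    simp only [Int.abs_eq_natAbs] <;> omega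

-- ---- greedy = prefix-flow potential ----

theorem loop2_eq_PP (n : Nat) : ∀ (B S : List (Int × Int)),
    (∀ e ∈ B, 0 < e.1) → (∀ e ∈ S, e.1 ≤ 0) →
    B.Pairwise (fun a b => a.2 ≤ b.2) → S.Pairwise (fun a b => a.2 ≤ b.2) →
    (∀ e ∈ B, 0 ≤ e.2 ∧ e.2 < (n : Int)) → (∀ e ∈ S, 0 ≤ e.2 ∧ e.2 < (n : Int)) →
    loop2 B S = PP n B S := by
  intro B S
  induction B, S using loop2.induct with
  | case1 S =>
    intro _ hSneg _ _ _ _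
    rw [loop2]
    unfold PP
    rw [eq_comm, Finset.sum_eq_zero]
    intro t _
    have h1 := csF_nonneg (t := (t : Int)) hSneg
    have h2 := totS_nonneg hSneg
    simp only [cbF, totB, List.map_nil, List.sum_nil]
    simp only [Int.abs_eq_natAbs]
    omega
  | case2 e B =>
    intro hBpos _ _ _ _ _
    rw [loop2]
    unfold PP
    rw [eq_comm, Finset.sum_eq_zero]
    intro t _
    have h1 := cbF_nonneg (L := e :: B) (t := (t : Int)) (fun e' he' => le_of_lt (hBpos e' he'))
    have h2 := totB_nonneg (L := e :: B) (fun e' he' => le_of_lt (hBpos e' he'))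
    simp only [csF, totS, List.map_nil, List.sum_nil]
    simp only [Int.abs_eq_natAbs]
    omega
  | case3 e B f S ih =>
    intro hBpos hSneg hBsort hSsort hBr hSr
    rw [loop2]
    set mn := min e.1 (-f.1) with hmn
    set B₂ := (if e.1 - mn = 0 then B else (e.1 - mn, e.2) :: B) with hB2
    set S₂ := (if f.1 + mn = 0 then S else (f.1 + mn, f.2) :: S) with hS2
    -- basic sign facts
    have he1 : 0 < e.1 := hBpos e (by simp)
    have hf1 : f.1 ≤ 0 := hSneg f (by simp)
    have hBpos' : ∀ e' ∈ B, 0 < e'.1 := fun e' he' => hBpos e' (by simp [he'])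
    have hSneg' : ∀ e' ∈ S, e'.1 ≤ 0 := fun e' he' => hSneg e' (by simp [he'])
    have htailB : 0 ≤ totB B := totB_nonneg (fun e' he' => le_of_lt (hBpos' e' he'))
    have htailS : 0 ≤ totS S := totS_nonneg hSneg'
    have htBc : totB (e :: B) = e.1 + totB B := by simp [totB]
    have htSc : totS (f :: S) = -f.1 + totS S := by simp [totS]
    have hmn0 : 0 ≤ mn := by omega
    have hM : mn ≤ min (totB (e :: B)) (totS (f :: S)) := by omega
    -- invariants for the updated lists
    have hB2pos : ∀ e' ∈ B₂, 0 < e'.1 := by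
      rw [hB2]; split_ifs with h0
      · exact hBpos'
      · intro e' he'
        rcases List.mem_cons.mp he' with h | h
        · subst h; simp only; omega
        · exact hBpos' e' h
    have hS2neg : ∀ e' ∈ S₂, e'.1 ≤ 0 := by
      rw [hS2]; split_ifs with h0
      · exact hSneg'
      · intro e' he'
        rcases List.mem_cons.mp he' with h | h
        · subst h; simp only; omega
        · exact hSneg' e' h
    have hBsort' := (List.pairwise_cons.mp hBsort).2
    have hBhead := (List.pairwise_cons.mp hBsort).1
    have hSsort' := (List.pairwise_cons.mp hSsort).2
    have hShead := (List.pairwise_cons.mp hSsort).1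
    have hB2sort : B₂.Pairwise (fun a b => a.2 ≤ b.2) := by
      rw [hB2]; split_ifs
      · exact hBsort'
      · exact List.pairwise_cons.mpr ⟨fun e' he' => hBhead e' he', hBsort'⟩
    have hS2sort : S₂.Pairwise (fun a b => a.2 ≤ b.2) := by
      rw [hS2]; split_ifs
      · exact hSsort'
      · exact List.pairwise_cons.mpr ⟨fun e' he' => hShead e' he', hSsort'⟩
    have hBr' : ∀ e' ∈ B, 0 ≤ e'.2 ∧ e'.2 < (n : Int) := fun e' he' => hBr e' (by simp [he'])
    have hSr' : ∀ e' ∈ S, 0 ≤ e'.2 ∧ e'.2 < (n : Int) := fun e' he' => hSr e' (by simp [he'])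
    have hB2r : ∀ e' ∈ B₂, 0 ≤ e'.2 ∧ e'.2 < (n : Int) := by
      rw [hB2]; split_ifs
      · exact hBr'
      · intro e' he'
        rcases List.mem_cons.mp he' with h | h
        · subst h; exact hBr e (by simp)
        · exact hBr' e' h
    have hS2r : ∀ e' ∈ S₂, 0 ≤ e'.2 ∧ e'.2 < (n : Int) := by
      rw [hS2]; split_ifs
      · exact hSr'
      · intro e' he'
        rcases List.mem_cons.mp he' with h | h
        · subst h; exact hSr f (by simp)
        · exact hSr' e' h
    have ih' : loop2 B₂ S₂ = PP n B₂ S₂ := ih hB2pos hS2neg hB2sort hS2sort hB2r hS2r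
    rw [ih']
    -- totals of the updated lists
    have htot2B : totB B₂ = totB (e :: B) - mn := by
      rw [hB2]; split_ifs with h0 <;> simp [totB] <;> omega
    have htot2S : totS S₂ = totS (f :: S) - mn := by
      rw [hS2]; split_ifs with h0 <;> simp [totS] <;> omega
    -- the per-gap identity, summed
    have hep := hBr e (by simp)
    have hfp := hSr f (by simp)
    have hsum : PP n (e :: B) (f :: S)
        = PP n B₂ S₂ + mn * (max e.2 f.2 - min e.2 f.2) := by
      unfold PP
      have hpt : ∀ t ∈ Finset.range n,
          |min (cbF (e :: B) t) (min (totB (e :: B)) (totS (f :: S)))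
            - min (csF (f :: S) t) (min (totB (e :: B)) (totS (f :: S)))|
          = |min (cbF B₂ t) (min (totB B₂) (totS S₂))
              - min (csF S₂ t) (min (totB B₂) (totS S₂))|
            + (if min e.2 f.2 ≤ (t : Int) ∧ (t : Int) < max e.2 f.2 then mn else 0) := by
        intro t _
        have hcb : if e.2 ≤ (t : Int) then mn ≤ cbF (e :: B) t else cbF (e :: B) t = 0 := by
          split_ifs with hbp
          · rw [cbF_cons, if_pos hbp]
            have := cbF_nonneg (t := (t : Int)) (fun e' he' => le_of_lt (hBpos' e' he'))
            omega
          · exact cbF_eq_zero (fun e' he' => by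
              rcases List.mem_cons.mp he' with h | h
              · subst h; omega
              · have := hBhead e' h; omega)
        have hcs : if f.2 ≤ (t : Int) then mn ≤ csF (f :: S) t else csF (f :: S) t = 0 := by
          split_ifs with hbq
          · rw [csF_cons, if_pos hbq]
            have := csF_nonneg (t := (t : Int)) hSneg'
            omega
          · exact csF_eq_zero (fun e' he' => by
              rcases List.mem_cons.mp he' with h | h
              · subst h; omega
              · have := hShead e' h; omega)
        have hcb2 : cbF B₂ t = cbF (e :: B) t - (if e.2 ≤ (t : Int) then mn else 0) := by
          by_cases h0 : e.1 - mn = 0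
          · rw [hB2, if_pos h0, cbF_cons]
            split_ifs <;> omega
          · rw [hB2, if_neg h0, cbF_cons, cbF_cons]
            dsimp only
            split_ifs <;> omega
        have hcs2 : csF S₂ t = csF (f :: S) t - (if f.2 ≤ (t : Int) then mn else 0) := by
          by_cases h0 : f.1 + mn = 0
          · rw [hS2, if_pos h0, csF_cons]
            split_ifs <;> omega
          · rw [hS2, if_neg h0, csF_cons, csF_cons]
            dsimp only
            split_ifs <;> omega
        have hM2 : min (totB B₂) (totS S₂)
            = min (totB (e :: B)) (totS (f :: S)) - mn := by
          rw [htot2B, htot2S]; omega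
        rw [hcb2, hcs2, hM2]
        rw [term_step (cbF (e :: B) t) (csF (f :: S) t)
              (min (totB (e :: B)) (totS (f :: S))) mn
              (e.2 ≤ (t : Int)) (f.2 ≤ (t : Int)) hmn0 hM hcb hcs]
        congr 1
        split_ifs <;> omega
      rw [Finset.sum_congr rfl hpt, Finset.sum_add_distrib,
          sum_ite_Ico mn n (min e.2 f.2) (max e.2 f.2) (by omega) (by omega) (by omega)]
    rw [hsum]
    have habs : max e.2 f.2 - min e.2 f.2 = |e.2 - f.2| := by
      rw [max_sub_min_eq_abs, abs_sub_comm]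
    rw [habs]
    ring

-- ---- A's index loop = head-consuming loop ----

theorem drop_set_self {α : Type} (xs : List α) (i : Nat) (v : α) (h : i < xs.length) :
    (xs.set i v).drop i = v :: xs.drop (i + 1) := by
  induction xs generalizing i with
  | nil => simp at h
  | cons x xs ih =>
    cases i with
    | zero => simp
    | succ i =>
      simp only [List.set_cons_succ, List.drop_succ_cons]
      exact ih i (by simpa using h)

theorem drop_succ_set {α : Type} (xs : List α) (i : Nat) (v : α) :
    (xs.set i v).drop (i + 1) = xs.drop (i + 1) := by
  induction xs generalizing i with
  | nil => simp
  | cons x xs ih =>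
    cases i with
    | zero => simp
    | succ i =>
      simp only [List.set_cons_succ, List.drop_succ_cons]
      exact ih i

-- one let-free unfolding of the loop
theorem loopA_unfold (buy sell : List (Int × Int)) (i j : Nat) (ans : Int) :
    wineSellingLoop buy sell i j ans =
      if i < buy.length ∧ j < sell.length then
        (if i + j <
            (if (buy.getD i (0, 0)).1 - min (buy.getD i (0, 0)).1 |(sell.getD j (0, 0)).1| = 0 then i + 1 else i)
            + (if (sell.getD j (0, 0)).1 + min (buy.getD i (0, 0)).1 |(sell.getD j (0, 0)).1| = 0 then j + 1 else j)
        then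
          wineSellingLoop
            (buy.set i ((buy.getD i (0, 0)).1 - min (buy.getD i (0, 0)).1 |(sell.getD j (0, 0)).1|, (buy.getD i (0, 0)).2))
            (sell.set j ((sell.getD j (0, 0)).1 + min (buy.getD i (0, 0)).1 |(sell.getD j (0, 0)).1|, (sell.getD j (0, 0)).2))
            (if (buy.getD i (0, 0)).1 - min (buy.getD i (0, 0)).1 |(sell.getD j (0, 0)).1| = 0 then i + 1 else i)
            (if (sell.getD j (0, 0)).1 + min (buy.getD i (0, 0)).1 |(sell.getD j (0, 0)).1| = 0 then j + 1 else j)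
            (ans + |(buy.getD i (0, 0)).2 - (sell.getD j (0, 0)).2| * min (buy.getD i (0, 0)).1 |(sell.getD j (0, 0)).1|)
        else ans + |(buy.getD i (0, 0)).2 - (sell.getD j (0, 0)).2| * min (buy.getD i (0, 0)).1 |(sell.getD j (0, 0)).1|)
      else ans := by
  rw [wineSellingLoop]
  rfl

theorem loopA_eq_fuel : ∀ (fuel : Nat) (buy sell : List (Int × Int)) (i j : Nat) (ans : Int),
    (buy.length - i) + (sell.length - j) ≤ fuel →
    (∀ e ∈ sell, e.1 ≤ 0) →
    wineSellingLoop buy sell i j ans = ans + loop2 (buy.drop i) (sell.drop j) := by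
  intro fuel
  induction fuel with
  | zero =>
    intro buy sell i j ans hfuel hs
    have hnot : ¬(i < buy.length ∧ j < sell.length) := by omega
    rw [loopA_unfold, if_neg hnot]
    have hd : buy.drop i = [] := List.drop_eq_nil_of_le (by omega)
    rw [hd]
    simp [loop2]
  | succ fuel ihf =>
    intro buy sell i j ans hfuel hs
    rw [loopA_unfold]
    by_cases h : i < buy.length ∧ j < sell.length
    · obtain ⟨hi, hj⟩ := h
      rw [if_pos ⟨hi, hj⟩]
      set bv := buy.getD i (0, 0) with hbv
      set sv := sell.getD j (0, 0) with hsv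
      have hsmem : sv ∈ sell := by
        rw [hsv, List.getD_eq_getElem sell (0, 0) hj]
        exact List.getElem_mem hj
      have hsneg : sv.1 ≤ 0 := hs sv hsmem
      have habs : |sv.1| = -sv.1 := abs_of_nonpos hsneg
      rw [habs]
      set mn := min bv.1 (-sv.1) with hmn
      have hchoice := min_choice bv.1 (-sv.1)
      have hprog : i + j <
          (if bv.1 - mn = 0 then i + 1 else i) + (if sv.1 + mn = 0 then j + 1 else j) := by
        rcases hchoice with hc | hc <;> rw [← hmn] at hc <;> split_ifs <;> omega
      rw [if_pos hprog]
      -- the recursive call via the induction hypothesis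
      have hs' : ∀ e ∈ sell.set j (sv.1 + mn, sv.2), e.1 ≤ 0 := by
        intro e he
        rcases List.mem_or_eq_of_mem_set he with he' | he'
        · exact hs e he'
        · rw [he']; simp only; omega
      have hlen : ((buy.set i (bv.1 - mn, bv.2)).length -
            (if bv.1 - mn = 0 then i + 1 else i))
          + ((sell.set j (sv.1 + mn, sv.2)).length -
            (if sv.1 + mn = 0 then j + 1 else j)) ≤ fuel := by
        simp only [List.length_set]
        split_ifs at hprog ⊢ <;> omega
      rw [ihf _ _ _ _ _ hlen hs']
      -- unfold one step of loop2 on the dropped lists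
      have hdb : buy.drop i = bv :: buy.drop (i + 1) := by
        rw [hbv, List.getD_eq_getElem buy (0, 0) hi]
        exact List.drop_eq_getElem_cons hi
      have hds : sell.drop j = sv :: sell.drop (j + 1) := by
        rw [hsv, List.getD_eq_getElem sell (0, 0) hj]
        exact List.drop_eq_getElem_cons hj
      rw [hdb, hds, loop2]
      simp only [← hmn]
      -- identify the dropped updated lists
      have hX : (buy.set i (bv.1 - mn, bv.2)).drop (if bv.1 - mn = 0 then i + 1 else i)
          = (if bv.1 - mn = 0 then buy.drop (i + 1) else (bv.1 - mn, bv.2) :: buy.drop (i + 1)) := by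
        split_ifs
        · exact drop_succ_set buy i _
        · exact drop_set_self buy i _ hi
      have hY : (sell.set j (sv.1 + mn, sv.2)).drop (if sv.1 + mn = 0 then j + 1 else j)
          = (if sv.1 + mn = 0 then sell.drop (j + 1) else (sv.1 + mn, sv.2) :: sell.drop (j + 1)) := by
        split_ifs
        · exact drop_succ_set sell j _
        · exact drop_set_self sell j _ hj
      rw [hX, hY]
      ring
    · rw [if_neg h]
      rcases Decidable.not_and_iff_or_not.mp h with h' | h'
      · have hd : buy.drop i = [] := List.drop_eq_nil_of_le (by omega)
        rw [hd]; simp [loop2]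
      · have hd : sell.drop j = [] := List.drop_eq_nil_of_le (by omega)
        rw [hd]
        cases hb : buy.drop i <;> simp [loop2]

theorem loopA_eq (buy sell : List (Int × Int)) (ans : Int)
    (hs : ∀ e ∈ sell, e.1 ≤ 0) :
    wineSellingLoop buy sell 0 0 ans = ans + loop2 buy sell := by
  have := loopA_eq_fuel (buy.length + sell.length) buy sell 0 0 ans (by omega) hs
  simpa using this

-- ---- facts about splitL ----

theorem splitL_mem₁ : ∀ (L : List Int) (k : Int) (e : Int × Int), e ∈ (splitL L k).1 →
    0 < e.1 ∧ k ≤ e.2 ∧ e.2 < k + (L.length : Int) := by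
  intro L
  induction L with
  | nil => intro k e he; simp [splitL] at he
  | cons x xs ih =>
    intro k e he
    by_cases hx : x > 0 <;> simp only [splitL, if_pos, if_neg, hx, if_true, if_false] at he
    · rcases List.mem_cons.mp he with h | h
      · subst h; simp only [List.length_cons]; push_cast; simp; omega
      · have := ih (k + 1) e h; simp only [List.length_cons] at this ⊢; push_cast at this ⊢; omega
    · have := ih (k + 1) e he; simp only [List.length_cons] at this ⊢; push_cast at this ⊢; omega

theorem splitL_mem₂ : ∀ (L : List Int) (k : Int) (e : Int × Int), e ∈ (splitL L k).2 →
    e.1 ≤ 0 ∧ k ≤ e.2 ∧ e.2 < k + (L.length : Int) := by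
  intro L
  induction L with
  | nil => intro k e he; simp [splitL] at he
  | cons x xs ih =>
    intro k e he
    by_cases hx : x > 0 <;> simp only [splitL, if_pos, if_neg, hx, if_true, if_false] at he
    · have := ih (k + 1) e he; simp only [List.length_cons] at this ⊢; push_cast at this ⊢; omega
    · rcases List.mem_cons.mp he with h | h
      · subst h; simp only [List.length_cons]; push_cast; simp; omega
      · have := ih (k + 1) e h; simp only [List.length_cons] at this ⊢; push_cast at this ⊢; omega

theorem splitL_pairwise₁ : ∀ (L : List Int) (k : Int),
    ((splitL L k).1).Pairwise (fun a b => a.2 ≤ b.2) := by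
  intro L
  induction L with
  | nil => intro k; simp [splitL]
  | cons x xs ih =>
    intro k
    by_cases hx : x > 0 <;> simp only [splitL, if_pos, if_neg, hx, if_true, if_false]
    · exact List.pairwise_cons.mpr ⟨fun e he => by have := splitL_mem₁ xs (k + 1) e he; simp; omega, ih (k + 1)⟩
    · exact ih (k + 1)

theorem splitL_pairwise₂ : ∀ (L : List Int) (k : Int),
    ((splitL L k).2).Pairwise (fun a b => a.2 ≤ b.2) := by
  intro L
  induction L with
  | nil => intro k; simp [splitL]
  | cons x xs ih =>
    intro k
    by_cases hx : x > 0 <;> simp only [splitL, if_pos, if_neg, hx, if_true, if_false]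
    · exact ih (k + 1)
    · exact List.pairwise_cons.mpr ⟨fun e he => by have := splitL_mem₂ xs (k + 1) e he; simp; omega, ih (k + 1)⟩

theorem splitL_append : ∀ (xs ys : List Int) (k : Int),
    splitL (xs ++ ys) k
      = ((splitL xs k).1 ++ (splitL ys (k + (xs.length : Int))).1,
         (splitL xs k).2 ++ (splitL ys (k + (xs.length : Int))).2) := by
  intro xs
  induction xs with
  | nil => intro ys k; simp [splitL]
  | cons x xs ih =>
    intro ys k
    have harith : k + 1 + (xs.length : Int) = k + ((xs.length : Int) + 1) := by ring
    by_cases hx : x > 0 <;>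
      simp only [List.cons_append, splitL, hx, if_true, if_false, ih ys (k + 1),
        List.length_cons] <;>
      push_cast <;> rw [harith] <;> simp

theorem totB_splitL : ∀ (L : List Int) (k : Int),
    totB (splitL L k).1 = (L.filter (fun x => x > 0)).sum := by
  intro L
  induction L with
  | nil => intro k; simp [splitL, totB]
  | cons x xs ih =>
    intro k
    by_cases hx : x > 0 <;>
      simp [splitL, totB, List.filter_cons, hx, ← ih (k + 1)] <;> simp [totB]

theorem totS_splitL : ∀ (L : List Int) (k : Int),
    totS (splitL L k).2 = ((L.filter (fun x => x ≤ 0)).map (fun x => -x)).sum := by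
  intro L
  induction L with
  | nil => intro k; simp [splitL, totS]
  | cons x xs ih =>
    intro k
    have hiff : (x ≤ 0) = ¬(x > 0) := by simp [not_lt]
    by_cases hx : x > 0 <;>
      simp [splitL, totS, List.filter_cons, hx, not_lt.mpr, ← ih (k + 1), show ¬(x ≤ 0) ↔ (0 < x) by omega, show (x ≤ 0) ↔ ¬(0 < x) by omega] <;> simp [totS]

-- ---- A's building fold = splitL of the prefix ----

theorem build_eq (A : List Int) : ∀ (n : Nat), n ≤ A.length →
    (PySem.List.pyRange 0 (n : Int) 1).foldl
      (fun (acc : List (Int × Int) × List (Int × Int)) i =>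
        let x := PySem.List.pyGetD A i 0
        if x > 0 then (acc.1 ++ [(x, i)], acc.2) else (acc.1, acc.2 ++ [(x, i)]))
      ([], [])
    = splitL (A.take n) 0 := by
  intro n
  induction n with
  | zero =>
    intro _
    simp [PySem.List.pyRange_one, splitL]
  | succ n ih =>
    intro h
    have hn : n ≤ A.length := Nat.le_of_succ_le h
    have hlt : n < A.length := h
    have hrange : PySem.List.pyRange 0 ((n + 1 : Nat) : Int) 1
        = PySem.List.pyRange 0 ((n : Nat) : Int) 1 ++ [((n : Nat) : Int)] := by
      rw [PySem.List.pyRange_one, PySem.List.pyRange_one]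
      have h1 : (((n : Nat) : Int) + 1 - 0).toNat = n + 1 := by omega
      have h2 : (((n : Nat) : Int) - 0).toNat = n := by omega
      push_cast
      rw [h1, h2, List.range_succ, List.map_append]
      simp
    rw [hrange, List.foldl_append, ih hn]
    have hx : PySem.List.pyGetD A ((n : Nat) : Int) 0 = A[n] := by
      rw [PySem.List.pyGetD_natCast]
      exact List.getD_eq_getElem A 0 hlt
    have htake : A.take (n + 1) = A.take n ++ [A[n]] := by
      rw [List.take_succ, List.getElem?_eq_getElem hlt]
      rfl
    rw [htake, splitL_append]
    have hlen : (0 : Int) + ((A.take n).length : Int) = ((n : Nat) : Int) := by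
      simp [List.length_take]
      omega
    rw [hlen]
    simp only [List.foldl_cons, List.foldl_nil, hx]
    by_cases hxx : A[n] > 0 <;> simp [hxx, splitL]

-- ---- B's fold = prefix-flow sums ----

theorem foldB_eq (m : Int) : ∀ (L : List Int) (k cb0 cs0 ans : Int),
    (L.foldl
      (fun (st : Int × Int × Int) x =>
        let cb := if x > 0 then st.2.1 + x else st.2.1
        let cs := if x > 0 then st.2.2 else st.2.2 - x
        (st.1 + |min cb m - min cs m|, cb, cs)) (ans, cb0, cs0)).1
    = ans + ∑ u ∈ Finset.range L.length,
        |min (cb0 + cbF (splitL L k).1 (k + (u : Int))) m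
          - min (cs0 + csF (splitL L k).2 (k + (u : Int))) m| := by
  intro L
  induction L with
  | nil => intro k cb0 cs0 ans; simp
  | cons x xs ih =>
    intro k cb0 cs0 ans
    simp only [List.foldl_cons, List.length_cons]
    rw [ih (k + 1) (if x > 0 then cb0 + x else cb0) (if x > 0 then cs0 else cs0 - x)
        (ans + |min (if x > 0 then cb0 + x else cb0) m - min (if x > 0 then cs0 else cs0 - x) m|)]
    rw [Finset.sum_range_succ']
    have hsp1 : cbF (splitL xs (k + 1)).1 k = 0 :=
      cbF_eq_zero (fun e he => by have := splitL_mem₁ xs (k + 1) e he; omega)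
    have hsp2 : csF (splitL xs (k + 1)).2 k = 0 :=
      csF_eq_zero (fun e he => by have := splitL_mem₂ xs (k + 1) e he; omega)
    have hterm0 :
        |min (cb0 + cbF (splitL (x :: xs) k).1 (k + ((0 : Nat) : Int))) m
          - min (cs0 + csF (splitL (x :: xs) k).2 (k + ((0 : Nat) : Int))) m|
        = |min (if x > 0 then cb0 + x else cb0) m - min (if x > 0 then cs0 else cs0 - x) m| := by
      by_cases hx : x > 0 <;>
        simp only [splitL, hx, if_true, if_false, Nat.cast_zero, add_zero, cbF_cons, csF_cons,
          hsp1, hsp2, le_refl, if_pos] <;> ring_nf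
    have hcong : ∀ u ∈ Finset.range xs.length,
        |min (cb0 + cbF (splitL (x :: xs) k).1 (k + ((u + 1 : Nat) : Int))) m
          - min (cs0 + csF (splitL (x :: xs) k).2 (k + ((u + 1 : Nat) : Int))) m|
        = |min ((if x > 0 then cb0 + x else cb0) + cbF (splitL xs (k + 1)).1 (k + 1 + (u : Int))) m
          - min ((if x > 0 then cs0 else cs0 - x) + csF (splitL xs (k + 1)).2 (k + 1 + (u : Int))) m| := by
      intro u _
      have ht : k + ((u + 1 : Nat) : Int) = k + 1 + (u : Int) := by push_cast; ring
      by_cases hx : x > 0 <;>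
        simp only [splitL, hx, if_true, if_false, cbF_cons, csF_cons, ht] <;>
        rw [if_pos (by omega)] <;> ring_nf
    rw [Finset.sum_congr rfl hcong]
    simp only [Nat.cast_zero, add_zero] at hterm0
    ring_nf at hterm0 ⊢
    linarith [hterm0]

-- ===== VERDICT (by name: the statement is the Claim_ definition above) =====
theorem wineSelling_spec : Claim_equal_wineSelling := by
  unfold Claim_equal_wineSelling
  intro A N _ hpre
  unfold Pre_wineSelling at hpre
  unfold Spec_wineSelling
  set n := N.toNat with hn
  have hnle : n ≤ A.length := by omega
  have hmax : max N 0 = ((n : Nat) : Int) := by omega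
  have hrange : PySem.List.pyRange 0 N 1 = PySem.List.pyRange 0 ((n : Nat) : Int) 1 := by
    rw [PySem.List.pyRange_one, PySem.List.pyRange_one]
    congr 2
    omega
  simp only [wineSelling, wineSelling_alt]
  rw [hrange, build_eq A n hnle, hmax, PySem.List.slice_to_natCast]
  have hsneg : ∀ e ∈ (splitL (A.take n) 0).2, e.1 ≤ 0 :=
    fun e he => (splitL_mem₂ _ 0 e he).1
  rw [loopA_eq _ _ 0 hsneg]
  have hlen : (A.take n).length = n := by simp [List.length_take]; omega
  rw [loop2_eq_PP n _ _
        (fun e he => (splitL_mem₁ _ 0 e he).1) hsneg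
        (splitL_pairwise₁ _ 0) (splitL_pairwise₂ _ 0)
        (fun e he => by
          have := splitL_mem₁ (A.take n) 0 e he
          rw [hlen] at this
          exact ⟨by omega, by omega⟩)
        (fun e he => by
          have := splitL_mem₂ (A.take n) 0 e he
          rw [hlen] at this
          exact ⟨by omega, by omega⟩)]
  rw [foldB_eq]
  unfold PP
  rw [hlen, totB_splitL, totS_splitL]
  rw [zero_add, zero_add]
  apply Finset.sum_congr rfl
  intro u _
  rw [zero_add, zero_add, zero_add]
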